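-- pv_equiv track=rewrite | github.com/paiml/depyler | examples/hard_dp_house_rob.py | rob_with_cooldown
-- ===== SOURCE A (Python) =====
-- def rob_with_cooldown(houses: list[int]) -> int:
--     """Rob with cooldown: must wait one house after robbing."""
--     n: int = len(houses)
--     if n == 0:
--         return 0
--     if n == 1:
--         return houses[0]
--     if n == 2:
--         if houses[0] > houses[1]:
--             return houses[0]
--         return houses[1]
--     dp: list[int] = []
--     idx: int = 0
--     while idx < n:
--         dp.append(0)
--         idx = idx + 1
--     dp[0] = houses[0]
--     if houses[1] > houses[0]:
--         dp[1] = houses[1]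
--     else:
--         dp[1] = houses[0]
--     i: int = 2
--     while i < n:
--         skip: int = dp[i - 1]
--         take: int = houses[i]
--         if i >= 3:
--             take = take + dp[i - 3]
--         else:
--             pass
--         cooldown_take: int = houses[i] + dp[i - 2]
--         best: int = skip
--         if take > best:
--             best = take
--         if cooldown_take > best:
--             best = cooldown_take
--         dp[i] = best
--         i = i + 1
--     return dp[n - 1]
-- ===== SOURCE B (Python) =====
-- def rob_with_cooldown(houses: list[int]) -> int:
--     """Rob with cooldown: must wait one house after robbing."""
--     if not houses:
--         return 0
--     # Different DP state: ends[i] = best total of a plan whose LAST robbed house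
--     # is i (instead of A's "best over the prefix"); the answer is max(ends).
--     # A plan may start alone only at one of the first three houses, hence the
--     # floor at 0 for i == 2 and the running max m = max(ends[:i-1]) for i >= 3.
--     ends: list[int] = []
--     m = 0
--     i = 0
--     for h in houses:
--         if i < 2:
--             ends.append(h)
--         elif i == 2:
--             ends.append(h + max(ends[0], 0))
--         else:
--             ends.append(h + m)
--         if i == 1:
--             m = ends[0]
--         elif i > 1:
--             m = max(m, ends[i - 1])
--         i = i + 1
--     return max(ends)
-- ===== Notes on version B (the rewrite author's own statement) =====
-- stated objective: alternative
-- what changed: Replaces A's prefix-DP (dp[i] = best over houses[0..i] via a 3-way max with an i>=3 guard and n==1/n==2 base branches) with a different DP state: ends[i] = best plan robbing house i LAST, computed from a running maximum m of earlier ends, with the answer taken as max(ends) at the end; no 3-term recurrence and no small-n special cases.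
import Mathlib
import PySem

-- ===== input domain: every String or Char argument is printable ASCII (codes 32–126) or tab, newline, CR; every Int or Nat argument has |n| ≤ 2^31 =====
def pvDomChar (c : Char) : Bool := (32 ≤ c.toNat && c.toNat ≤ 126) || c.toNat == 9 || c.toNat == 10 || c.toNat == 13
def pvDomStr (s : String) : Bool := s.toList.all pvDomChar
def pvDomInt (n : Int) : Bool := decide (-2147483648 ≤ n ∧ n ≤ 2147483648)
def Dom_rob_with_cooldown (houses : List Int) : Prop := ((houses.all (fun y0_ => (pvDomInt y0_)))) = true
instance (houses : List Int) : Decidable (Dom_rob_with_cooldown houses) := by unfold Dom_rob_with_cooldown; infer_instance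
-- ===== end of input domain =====

-- B uses a different DP state: ends[i] = best plan robbing house i last, with a running max and a final max(ends), instead of A's prefix-best array with its 3-way recurrence and small-n branches.

-- ===== PORT A =====
-- Every list index A reads/writes is provably in range on its path, so List.getD/List.set are exact here.
-- 'while idx < n: dp.append(0); idx = idx + 1'
def robPadA (n : Nat) (dp : List Int) (idx : Nat) : List Int :=
  if idx < n then robPadA n (dp ++ [0]) (idx + 1) else dp
termination_by n - idx

-- the body of A's 'while i < n' loop computing dp[i] (skip/take/cooldown_take/best)
def robStepA (houses dp : List Int) (i : Nat) : Int :=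
  let skip : Int := dp.getD (i - 1) 0
  let take0 : Int := houses.getD i 0
  let take : Int := if 3 ≤ i then take0 + dp.getD (i - 3) 0 else take0
  let cooldown_take : Int := houses.getD i 0 + dp.getD (i - 2) 0
  let best0 : Int := skip
  let best1 : Int := if take > best0 then take else best0
  if cooldown_take > best1 then cooldown_take else best1

def robLoopA (houses : List Int) (n : Nat) (dp : List Int) (i : Nat) : List Int :=
  if i < n then robLoopA houses n (dp.set i (robStepA houses dp i)) (i + 1) else dp
termination_by n - i

def rob_with_cooldown (houses : List Int) : Int :=
  let n := houses.length
  if n = 0 then 0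
  else if n = 1 then houses.getD 0 0
  else if n = 2 then (if houses.getD 0 0 > houses.getD 1 0 then houses.getD 0 0 else houses.getD 1 0)
  else
    let dp := robPadA n [] 0
    let dp := dp.set 0 (houses.getD 0 0)
    let dp := if houses.getD 1 0 > houses.getD 0 0 then dp.set 1 (houses.getD 1 0)
              else dp.set 1 (houses.getD 0 0)
    (robLoopA houses n dp 2).getD (n - 1) 0

-- ===== PORT B =====
-- 'for h in houses' with counter i, list ends and running max m; ends[0] and ends[i-1]
-- are read only on paths where they are in range, so List.getD is exact there.
def robLoopB (rest : List Int) (i : Nat) (ends : List Int) (m : Int) : List Int :=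
  match rest with
  | [] => ends
  | h :: t =>
    let ends' := if i < 2 then ends ++ [h]
                 else if i = 2 then ends ++ [h + max (ends.getD 0 0) 0]
                 else ends ++ [h + m]
    let m' := if i = 1 then ends'.getD 0 0
              else if 1 < i then max m (ends'.getD (i - 1) 0)
              else m
    robLoopB t (i + 1) ends' m'

def rob_with_cooldown_alt (houses : List Int) : Int :=
  if houses = [] then 0
  else (PySem.List.max? (robLoopB houses 0 [] 0) (fun y => y)).getD 0  -- max(ends), ends nonempty

-- ===== PRECONDITION & SPEC =====
def Spec_rob_with_cooldown (houses : List Int) (out : Int) : Prop := out = rob_with_cooldown_alt houses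
instance (houses : List Int) (out : Int) : Decidable (Spec_rob_with_cooldown houses out) := by unfold Spec_rob_with_cooldown; infer_instance

-- ===== CLAIM (what is proved, stated in full; the proofs are below) =====
def Claim_equal_rob_with_cooldown : Prop := ∀ (houses : List Int), Dom_rob_with_cooldown houses → Spec_rob_with_cooldown houses (rob_with_cooldown houses)

-- ===== LEMMAS AND PROOFS =====

-- max of a nonempty list, as a plain value (proof-side mirror of Python's max(ends))
def maxEnds : List Int → Int
  | [] => 0
  | h :: t => t.foldl max h

lemma maxEnds_bridge (l : List Int) (hl : l ≠ []) :
    (PySem.List.max? l (fun y => y)).getD 0 = maxEnds l := by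
  match l with
  | h :: t => rw [PySem.List.max?_id_cons]; rfl

lemma maxEnds_append (l : List Int) (x : Int) (hl : l ≠ []) :
    maxEnds (l ++ [x]) = max (maxEnds l) x := by
  match l with
  | h :: t => simp [maxEnds, List.foldl_append]

lemma robLoopB_length (rest : List Int) :
    ∀ (i : Nat) (ends : List Int) (m : Int),
    (robLoopB rest i ends m).length = ends.length + rest.length := by
  induction rest with
  | nil => intro i ends m; simp [robLoopB]
  | cons x t ih =>
    intro i ends m
    rw [robLoopB, ih]
    split_ifs <;> simp <;> omega

lemma robLoopB_ne_nil (rest : List Int) (i : Nat) (ends : List Int) (m : Int)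
    (h : ends ≠ [] ∨ rest ≠ []) : robLoopB rest i ends m ≠ [] := by
  intro hc
  have hl := robLoopB_length rest i ends m
  rw [hc] at hl
  simp only [List.length_nil] at hl
  rcases h with h | h
  · exact h (List.eq_nil_of_length_eq_zero (by omega))
  · exact h (List.eq_nil_of_length_eq_zero (by omega))

lemma robPadA_eq (n : Nat) (dp : List Int) (idx : Nat) :
    robPadA n dp idx = dp ++ List.replicate (n - idx) 0 := by
  fun_induction robPadA with
  | case1 dp idx h ih =>
      rw [ih]
      have h2 : n - idx = (n - (idx + 1)) + 1 := by omega
      rw [h2, List.replicate_succ]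
      simp
  | case2 dp idx h =>
      have h2 : n - idx = 0 := by omega
      simp [h2]

lemma drop_getD (houses : List Int) (i : Nat) (h : Int) (t : List Int)
    (hd : houses.drop i = h :: t) : houses.getD i 0 = h := by
  have h0 : (houses.drop i)[0]? = houses[i]? := by simp
  rw [hd] at h0
  simp at h0
  simp [List.getD_eq_getElem?_getD, ← h0]

lemma getD_set_self' (dp : List Int) (i : Nat) (v : Int) (h : i < dp.length) :
    (dp.set i v).getD i 0 = v := by
  simp [List.getD_eq_getElem?_getD, h]

lemma getD_set_ne' (dp : List Int) (i j : Nat) (v : Int) (h : j ≠ i) :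
    (dp.set i v).getD j 0 = dp.getD j 0 := by
  simp [List.getD_eq_getElem?_getD, List.getElem?_set_ne h.symm]

lemma getD_append_left (l : List Int) (x : Int) (j : Nat) (h : j < l.length) :
    (l ++ [x]).getD j 0 = l.getD j 0 := by
  simp [List.getD_eq_getElem?_getD, List.getElem?_append_left h]

lemma getD_append_last (l : List Int) (x : Int) :
    (l ++ [x]).getD l.length 0 = x := by
  simp [List.getD_eq_getElem?_getD]

-- A's loop body for i ≥ 3, simplified by dp-monotonicity (dp[i-3] ≤ dp[i-2])
lemma robStepA_eq2 (houses dp : List Int) (i : Nat) (h : Int)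
    (h3 : 3 ≤ i) (hh : houses.getD i 0 = h)
    (hmono : dp.getD (i - 3) 0 ≤ dp.getD (i - 2) 0) :
    robStepA houses dp i = max (dp.getD (i - 1) 0) (h + dp.getD (i - 2) 0) := by
  simp only [robStepA, hh, if_pos h3, max_def]
  split_ifs <;> omega

-- main invariant: from i ≥ 3 on, A's loop and B's loop agree;
-- m = dp[i-2], maxEnds ends = dp[i-1], max m ends[i-1] = dp[i-1], dp[i-3] ≤ dp[i-2]
lemma rob_loop_eq (rest : List Int) :
    ∀ (houses dp ends : List Int) (i : Nat) (m : Int),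
    3 ≤ i → i ≤ houses.length → dp.length = houses.length →
    houses.drop i = rest →
    ends.length = i →
    m = dp.getD (i - 2) 0 →
    maxEnds ends = dp.getD (i - 1) 0 →
    max m (ends.getD (i - 1) 0) = dp.getD (i - 1) 0 →
    dp.getD (i - 3) 0 ≤ dp.getD (i - 2) 0 →
    (robLoopA houses houses.length dp i).getD (houses.length - 1) 0
      = maxEnds (robLoopB rest i ends m) := by
  induction rest with
  | nil =>
    intro houses dp ends i m h3 hle hlen hd hel hm hmax _ _
    have hi : i = houses.length := by
      by_contra hne
      have := List.drop_eq_nil_iff.mp hd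
      omega
    rw [robLoopA]
    simp only [hi, lt_irrefl, if_false]
    rw [robLoopB, ← hi]
    exact hmax.symm
  | cons h t ih =>
    intro houses dp ends i m h3 hle hlen hd hel hm hmax hI4 hmono
    have hlt : i < houses.length := by
      by_contra hge
      rw [List.drop_eq_nil_of_le (by omega)] at hd
      exact absurd hd (by simp)
    have hne : ends ≠ [] := by intro hc; rw [hc] at hel; simp at hel; omega
    have hh : houses.getD i 0 = h := drop_getD houses i h t hd
    have hbest : robStepA houses dp i = max (dp.getD (i - 1) 0) (h + m) := by
      rw [robStepA_eq2 houses dp i h h3 hh hmono, hm]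
    -- unfold one step of each loop
    rw [robLoopA, if_pos hlt, robLoopB]
    simp only [show ¬ i < 2 by omega, if_false, show ¬ i = 2 by omega, if_false,
               show ¬ i = 1 by omega, if_false, show 1 < i by omega, if_true]
    rw [getD_append_left ends (h + m) (i - 1) (by omega), hI4]
    have hlast : (ends ++ [h + m]).getD i 0 = h + m := by
      rw [← hel]; exact getD_append_last ends (h + m)
    apply ih
    · omega
    · omega
    · simp [hlen]
    · rw [← List.drop_drop, hd]; simp
    · simp [hel]
    · -- m' = dp'[(i+1)-2]
      rw [show i + 1 - 2 = i - 1 from by omega, getD_set_ne' _ _ _ _ (by omega)]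
    · -- maxEnds ends' = dp'[(i+1)-1]
      rw [show i + 1 - 1 = i from by omega, maxEnds_append _ _ hne, hmax,
          getD_set_self' _ _ _ (by omega), hbest]
    · -- max m' (ends'[(i+1)-1]) = dp'[(i+1)-1]
      rw [show i + 1 - 1 = i from by omega, hlast,
          getD_set_self' _ _ _ (by omega), hbest]
    · -- dp'[(i+1)-3] ≤ dp'[(i+1)-2]
      rw [show i + 1 - 3 = i - 2 from by omega, show i + 1 - 2 = i - 1 from by omega,
          getD_set_ne' _ _ _ _ (by omega), getD_set_ne' _ _ _ _ (by omega)]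
      calc dp.getD (i - 2) 0 = m := hm.symm
        _ ≤ max m (ends.getD (i - 1) 0) := le_max_left _ _
        _ = dp.getD (i - 1) 0 := hI4

-- ===== VERDICT (by name: the statement is the Claim_ definition above) =====
theorem rob_with_cooldown_spec : Claim_equal_rob_with_cooldown := by
  intro houses _
  unfold Spec_rob_with_cooldown
  match houses with
  | [] => rfl
  | [h0] =>
    have hAlt : rob_with_cooldown_alt [h0] = h0 := by
      rw [rob_with_cooldown_alt, if_neg (by simp),
          maxEnds_bridge _ (robLoopB_ne_nil _ _ _ _ (Or.inr (by simp)))]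
      simp [robLoopB, maxEnds]
    show h0 = rob_with_cooldown_alt [h0]
    rw [hAlt]
  | [h0, h1] =>
    have hAlt : rob_with_cooldown_alt [h0, h1] = max h0 h1 := by
      rw [rob_with_cooldown_alt, if_neg (by simp),
          maxEnds_bridge _ (robLoopB_ne_nil _ _ _ _ (Or.inr (by simp)))]
      have hB : robLoopB [h0, h1] 0 [] 0 = [h0, h1] := by simp [robLoopB]
      rw [hB]
      simp [maxEnds]
    show (if h0 > h1 then h0 else h1) = rob_with_cooldown_alt [h0, h1]
    rw [hAlt]
    simp only [max_def]
    split_ifs <;> omega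
  | h0 :: h1 :: h2 :: rest =>
    have hn : (h0 :: h1 :: h2 :: rest).length = rest.length + 3 := by simp
    -- B side: run the first three iterations (i = 0, 1, 2)
    have hB : robLoopB (h0 :: h1 :: h2 :: rest) 0 [] 0
        = robLoopB rest 3 [h0, h1, h2 + max h0 0] (max h0 h1) := by
      simp [robLoopB]
    have hAlt : rob_with_cooldown_alt (h0 :: h1 :: h2 :: rest)
        = maxEnds (robLoopB rest 3 [h0, h1, h2 + max h0 0] (max h0 h1)) := by
      rw [rob_with_cooldown_alt, if_neg (by simp), hB,
          maxEnds_bridge _ (robLoopB_ne_nil _ _ _ _ (Or.inl (by simp)))]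
    -- A side: branches, dp initialisation, and the first loop iteration (i = 2)
    show (if rest.length + 3 = 0 then (0:Int) else _) = _
    rw [if_neg (by omega), if_neg (by omega), if_neg (by rw [hn]; omega)]
    simp only [List.getD_cons_zero, List.getD_cons_succ]
    have hdp : ∀ S : List Int, (if h1 > h0 then S.set 1 h1 else S.set 1 h0)
        = S.set 1 (max h0 h1) := by
      intro S; split_ifs with hc
      · rw [max_eq_right (by omega)]
      · rw [max_eq_left (by omega)]
    rw [hdp, hAlt, if_neg (by rw [hn]; omega)]
    rw [robLoopA, if_pos (by rw [hn]; omega)]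
    set dp0 := ((robPadA (h0 :: h1 :: h2 :: rest).length [] 0).set 0 h0).set 1 (max h0 h1)
      with hdp0
    have hlen0 : dp0.length = (h0 :: h1 :: h2 :: rest).length := by
      rw [hdp0]; simp [robPadA_eq]
    have hd0 : dp0.getD 0 0 = h0 := by
      rw [hdp0, getD_set_ne' _ _ _ _ (by omega)]
      exact getD_set_self' _ _ _ (by simp [robPadA_eq])
    have hd1 : dp0.getD 1 0 = max h0 h1 := by
      rw [hdp0]
      exact getD_set_self' _ _ _ (by simp [robPadA_eq])
    have hstep2 : robStepA (h0 :: h1 :: h2 :: rest) dp0 2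
        = max (max h0 h1) (h2 + max h0 0) := by
      simp only [robStepA, show ¬ (3:Nat) ≤ 2 from by omega, if_false,
        show (2:Nat) - 1 = 1 from rfl, show (2:Nat) - 2 = 0 from rfl,
        List.getD_cons_succ, List.getD_cons_zero, hd0, hd1, max_def]
      split_ifs <;> omega
    rw [hstep2]
    refine rob_loop_eq rest (h0 :: h1 :: h2 :: rest)
      (dp0.set 2 (max (max h0 h1) (h2 + max h0 0))) [h0, h1, h2 + max h0 0] 3
      (max h0 h1) (by omega) (by rw [hn]; omega) (by simp [hlen0]) (by simp)
      (by simp) ?_ ?_ ?_ ?_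
    · rw [show (3:Nat) - 2 = 1 from rfl, getD_set_ne' dp0 2 1 _ (by omega), hd1]
    · rw [show (3:Nat) - 1 = 2 from rfl,
          getD_set_self' _ _ _ (by rw [hlen0, hn]; omega)]
      simp [maxEnds]
    · rw [show (3:Nat) - 1 = 2 from rfl,
          getD_set_self' _ _ _ (by rw [hlen0, hn]; omega)]
      simp
    · rw [show (3:Nat) - 3 = 0 from rfl, show (3:Nat) - 2 = 1 from rfl,
          getD_set_ne' dp0 2 0 _ (by omega), getD_set_ne' dp0 2 1 _ (by omega), hd0, hd1]
      exact le_max_left _ _
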